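-- pv_equiv track=rewrite | github.com/SymmetricChaos/NumberTheory | Sequences/MathUtils.py | nontrivial_factors
-- ===== SOURCE A (Python) =====
-- from math import isqrt, gcd
--
-- def nontrivial_factors(n):
--     """All Non-Trivial Factors"""
--
--     if type(n) != int:
--         raise Exception("n must be an integer")
--
--     lim = isqrt(n)+1
--
--     S = set([])
--
--     for i in range(2,lim):
--         f,r = divmod(n,i)
--
--         if r == 0:
--             S.add(i)
--             S.add(f)
--
--     return S
-- ===== SOURCE B (Python) =====
-- from math import isqrt
--
-- def nontrivial_factors(n):
--     """All Non-Trivial Factors"""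
--
--     if type(n) != int:
--         raise Exception("n must be an integer")
--
--     root = isqrt(n)
--
--     # prime factorization of n as a list of primes with multiplicity
--     primes = []
--     m = n
--     p = 2
--     while p * p <= m:
--         while m % p == 0:
--             primes.append(p)
--             m //= p
--         p += 1
--     if m > 1:
--         primes.append(m)
--
--     # every divisor of n is the product of a sub-multiset of its prime factors
--     divs = {1}
--     for p in primes:
--         divs |= {d * p for d in divs}
--
--     # pair each small divisor with its cofactor across sqrt(n); 1 and n never qualify
--     S = set()
--     for d in sorted(divs):
--         if 2 <= d <= root:
--             S.add(d)
--             S.add(n // d)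
--     return S
-- ===== Notes on version B (the rewrite author's own statement) =====
-- stated objective: alternative
-- what changed: B replaces A's direct trial-division collection of divisor/cofactor pairs by a factor-then-generate strategy: it first factors n into a list of primes, then generates the full divisor set as products of sub-multisets of the prime factors, and finally pairs each small divisor (2..isqrt(n)) with its cofactor.
import Mathlib
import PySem

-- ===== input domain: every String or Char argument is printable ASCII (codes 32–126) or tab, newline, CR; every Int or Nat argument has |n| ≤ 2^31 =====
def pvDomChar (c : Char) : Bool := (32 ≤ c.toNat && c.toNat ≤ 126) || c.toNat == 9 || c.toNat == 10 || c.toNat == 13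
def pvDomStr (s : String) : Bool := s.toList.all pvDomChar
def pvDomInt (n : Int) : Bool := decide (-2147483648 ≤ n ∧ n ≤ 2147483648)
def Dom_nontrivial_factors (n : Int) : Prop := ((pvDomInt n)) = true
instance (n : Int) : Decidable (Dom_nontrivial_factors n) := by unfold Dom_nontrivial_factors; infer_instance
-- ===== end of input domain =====

-- B replaces A's direct trial-division collection of divisor/cofactor pairs by a
-- factor-then-generate strategy: factor n into a list of primes, generate all divisors
-- as products of sub-multisets of the prime factors, then pair each small divisor with
-- its cofactor (objective: alternative).

-- ===== PORT A =====
-- isqrt(n) is ported as Nat.sqrt n.toNat, exact on Pre_; Python raises ValueError for negative n (excluded by Pre_).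
def nontrivial_factors (n : Int) : List Int :=
  let lim : Int := (Nat.sqrt n.toNat : Int) + 1
  (PySem.List.pyRange 2 lim 1).foldl (fun S i =>
      let f := PySem.Int.floordiv n i
      let r := PySem.Int.mod n i
      if r = 0 then PySem.Set.add (PySem.Set.add S i) f else S)
    PySem.Set.empty

-- ===== PORT B =====
-- the inner while-loop of the factorization: divide out the factor p of m, appending p to
-- the prime list each time. The Nat fuel only makes the recursion structural; it is spent
-- strictly slower than m shrinks, so with the fuel given at the call site the 0-case is
-- never reached and the loop runs exactly as in Python.
def ntfInner : Nat → Int → Int → List Int → Int × List Int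
  | 0, _, m, ps => (m, ps)
  | fuel + 1, p, m, ps =>
    if PySem.Int.mod m p = 0 then ntfInner fuel p (PySem.Int.floordiv m p) (ps ++ [p])
    else (m, ps)

-- the outer while-loop of the factorization (fuel as above)
def ntfOuter : Nat → Int → Int → List Int → List Int
  | 0, _, _, ps => ps
  | fuel + 1, m, p, ps =>
    if p * p ≤ m then
      ntfOuter fuel (ntfInner (m.toNat + 1) p m ps).1 (p + 1) (ntfInner (m.toNat + 1) p m ps).2
    else if 1 < m then ps ++ [m] else ps

-- 'divs |= {d * p for d in divs}'
def ntfStep (D : List Int) (q : Int) : List Int :=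
  PySem.Set.union D (PySem.Set.ofList (D.map (fun d => d * q)))

def nontrivial_factors_alt (n : Int) : List Int :=
  let root : Int := (Nat.sqrt n.toNat : Int)
  let primes : List Int := ntfOuter (n.toNat + 2) n 2 []
  let divs : PySem.Set Int := primes.foldl ntfStep (PySem.Set.ofList [1])
  (PySem.List.sorted divs (fun d => d) false).foldl
    (fun S d =>
      if 2 ≤ d ∧ d ≤ root then PySem.Set.add (PySem.Set.add S d) (PySem.Int.floordiv n d)
      else S)
    PySem.Set.empty

-- ===== PRECONDITION & SPEC =====
-- Pre_ excludes negative n, on which the Python A raises ValueError (math.isqrt of a negative number).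
def Pre_nontrivial_factors (n : Int) : Prop := 0 ≤ n
instance (n : Int) : Decidable (Pre_nontrivial_factors n) := by unfold Pre_nontrivial_factors; infer_instance
def pvWitness_nontrivial_factors : Int := (36)

def Spec_nontrivial_factors (n : Int) (out : List Int) : Prop := out = nontrivial_factors_alt n
instance (n : Int) (out : List Int) : Decidable (Spec_nontrivial_factors n out) := by unfold Spec_nontrivial_factors; infer_instance

-- ===== CLAIM (what is proved, stated in full; the proofs are below) =====
def Claim_equal_nontrivial_factors : Prop := ∀ (n : Int), Dom_nontrivial_factors n → Pre_nontrivial_factors n → Spec_nontrivial_factors n (nontrivial_factors n)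

-- ===== LEMMAS AND PROOFS =====

-- Python's m // p strictly shrinks a positive m for p ≥ 2
theorem ntf_floordiv_lt (p m : Int) (hp : 2 ≤ p) (hm : 0 < m) :
    PySem.Int.floordiv m p < m := by
  rw [PySem.Int.floordiv_eq_ediv_of_pos (show (0:Int) < p by omega)]
  by_contra hc
  push Not at hc
  have hq := Int.ediv_mul_le m (show p ≠ 0 by omega)
  have hq0 : 0 ≤ m / p := Int.ediv_nonneg (by omega) (by omega)
  nlinarith

-- the inner loop divides out the maximal power of p (given enough fuel)
theorem ntfInner_spec (p : Int) : ∀ (fuel : Nat) (m : Int) (ps : List Int),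
    2 ≤ p → 0 < m → m.toNat < fuel →
    ∃ (k : Nat) (m' : Int), ntfInner fuel p m ps = (m', ps ++ List.replicate k p) ∧
      m = p ^ k * m' ∧ 0 < m' ∧ ¬ p ∣ m' := by
  intro fuel
  induction fuel with
  | zero => intro m ps _ _ hf; omega
  | succ fuel ih =>
    intro m ps hp hm hf
    by_cases hr : PySem.Int.mod m p = 0
    · have hdvd : p ∣ m := (PySem.Int.mod_eq_zero_iff_dvd m p).mp hr
      have hfd : PySem.Int.floordiv m p = m / p :=
        PySem.Int.floordiv_eq_ediv_of_pos (by omega)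
      have hpos : 0 < PySem.Int.floordiv m p := by
        rw [hfd]; exact Int.ediv_pos_of_pos_of_dvd hm (by omega) hdvd
      have hlt := ntf_floordiv_lt p m hp hm
      obtain ⟨k, m', heq, hprod, hm', hnd⟩ := ih (PySem.Int.floordiv m p) (ps ++ [p])
        hp hpos (by omega)
      refine ⟨k + 1, m', ?_, ?_, hm', hnd⟩
      · rw [ntfInner, if_pos hr, heq]
        simp [List.replicate_succ]
      · have hc : p * PySem.Int.floordiv m p = m := by
          rw [hfd]; exact Int.mul_ediv_cancel' hdvd
        rw [← hc, hprod, pow_succ]; ring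
    · refine ⟨0, m, ?_, by simp, hm,
        fun hd => hr ((PySem.Int.mod_eq_zero_iff_dvd m p).mpr hd)⟩
      rw [ntfInner, if_neg hr]; simp

-- a divisor of m with no smaller nontrivial divisor of m below it is prime
theorem prime_of_no_small_factor (p m : Int) (hp : 2 ≤ p) (hdvd : p ∣ m)
    (hsmall : ∀ q : Int, 2 ≤ q → q < p → ¬ q ∣ m) : Prime p := by
  have hpn : p = ((p.toNat : Nat) : Int) := by omega
  have hprime : Nat.Prime p.toNat := by
    by_contra hnp
    obtain ⟨a, hadvd, ha2, halt⟩ := Nat.exists_dvd_of_not_prime2 (by omega) hnp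
    have h1 : (a : Int) ∣ p := by rw [hpn]; exact_mod_cast Int.natCast_dvd_natCast.mpr hadvd
    exact hsmall a (by exact_mod_cast ha2) (by omega) (h1.trans hdvd)
  rw [hpn]; exact Nat.prime_iff_prime_int.mp hprime

-- the outer loop appends a complete prime factorization of m (given m has no factor
-- below p and enough fuel)
theorem ntfOuter_spec : ∀ (fuel : Nat) (m p : Int) (ps : List Int),
    2 ≤ p → 0 < m → m.toNat + 2 - p.toNat < fuel →
    (∀ q : Int, 2 ≤ q → q < p → ¬ q ∣ m) →
    ∃ tl : List Int, ntfOuter fuel m p ps = ps ++ tl ∧ tl.prod = m ∧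
      ∀ q ∈ tl, 2 ≤ q ∧ Prime q := by
  intro fuel
  induction fuel with
  | zero => intro m p ps _ _ hf; omega
  | succ fuel ih =>
    intro m p ps hp hm hf hsmall
    by_cases hpp : p * p ≤ m
    · obtain ⟨k, m', hinner, hprod, hm', hnd⟩ :=
        ntfInner_spec p (m.toNat + 1) m ps hp hm (by omega)
      have hm'dvd : m' ∣ m := ⟨p ^ k, by rw [hprod]; ring⟩
      have hm'le : m' ≤ m := Int.le_of_dvd hm hm'dvd
      have hpm : p ≤ m := by nlinarith
      have hsmall' : ∀ q : Int, 2 ≤ q → q < p + 1 → ¬ q ∣ m' := by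
        intro q h2 hlt hdv
        by_cases hq : q = p
        · exact hnd (hq ▸ hdv)
        · exact hsmall q h2 (by omega) (hdv.trans hm'dvd)
      obtain ⟨tl', houter, hprod', hpr'⟩ :=
        ih m' (p + 1) (ps ++ List.replicate k p) (by omega) hm' (by omega) hsmall'
      refine ⟨List.replicate k p ++ tl', ?_, ?_, ?_⟩
      · rw [ntfOuter, if_pos hpp, hinner]
        simpa using houter
      · rw [List.prod_append, List.prod_replicate, hprod', hprod]
      · intro q hq
        rcases List.mem_append.mp hq with hq | hq
        · have hqp : q = p := List.eq_of_mem_replicate hq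
          have hk : k ≠ 0 := by
            rintro rfl; simp at hq
          have hpmd : p ∣ m := by
            rw [hprod]; exact Dvd.dvd.mul_right (dvd_pow_self p hk) m'
          exact hqp ▸ ⟨hp, prime_of_no_small_factor p m hp hpmd hsmall⟩
        · exact hpr' q hq
    · have hmpp : m < p * p := by
        by_contra hc
        push Not at hc
        exact hpp hc
      by_cases h1 : 1 < m
      · rw [ntfOuter, if_neg hpp, if_pos h1]
        refine ⟨[m], rfl, by simp, ?_⟩
        intro q hq
        rcases List.mem_singleton.mp hq with rfl
        refine ⟨by omega, ?_⟩
        have hqn : q = ((q.toNat : Nat) : Int) := by omega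
        have hprime : Nat.Prime q.toNat := by
          by_contra hnp
          have hfc := Nat.minFac_sq_le_self (show 0 < q.toNat by omega) hnp
          have hfdv : (q.toNat.minFac : Int) ∣ q := by
            rw [hqn]; exact_mod_cast Int.natCast_dvd_natCast.mpr (Nat.minFac_dvd q.toNat)
          have hf2 : 2 ≤ q.toNat.minFac := (Nat.minFac_prime (show q.toNat ≠ 1 by omega)).two_le
          have hfq : (q.toNat.minFac : Int) < p := by
            have hsq : (q.toNat.minFac : Int) * (q.toNat.minFac : Int) ≤ q := by
              have : (q.toNat.minFac * q.toNat.minFac : Nat) ≤ q.toNat := by nlinarith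
              omega
            nlinarith
          exact hsmall q.toNat.minFac (by exact_mod_cast hf2) hfq hfdv
        rw [hqn]; exact Nat.prime_iff_prime_int.mp hprime
      · rw [ntfOuter, if_neg hpp, if_neg h1]
        have : m = 1 := by omega
        exact ⟨[], by simp, by simp [this], by simp⟩

-- every positive divisor of a product of primes is a product of a sub-multiset of them
theorem dvd_prod_primes : ∀ (L : List Int), (∀ q ∈ L, 2 ≤ q ∧ Prime q) →
    ∀ d : Int, 0 < d → d ∣ L.prod → ∃ S, List.Sublist S L ∧ d = S.prod := by
  intro L
  induction L with
  | nil =>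
    intro _ d hd hdvd
    rw [List.prod_nil] at hdvd
    exact ⟨[], List.nil_sublist [], by simpa using Int.eq_one_of_dvd_one (by omega) hdvd⟩
  | cons q L ih =>
    intro hL d hd hdvd
    have hq := hL q (by simp)
    rw [List.prod_cons] at hdvd
    by_cases hqd : q ∣ d
    · obtain ⟨d', rfl⟩ := hqd
      have hq0 : 0 < q := by omega
      have hd' : 0 < d' := by nlinarith
      have hdvd' : d' ∣ L.prod := (mul_dvd_mul_iff_left (show q ≠ 0 by omega)).mp hdvd
      obtain ⟨S, hS, rfl⟩ := ih (fun x hx => hL x (by simp [hx])) d' hd' hdvd'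
      exact ⟨q :: S, hS.cons₂ q, by rw [List.prod_cons]⟩
    · have hco : IsCoprime d q := ((Prime.coprime_iff_not_dvd hq.2).mpr hqd).symm
      have hdvd' : d ∣ L.prod := hco.dvd_of_dvd_mul_left hdvd
      obtain ⟨S, hS, rfl⟩ := ih (fun x hx => hL x (by simp [hx])) d hd hdvd'
      exact ⟨S, hS.cons q, rfl⟩

-- membership in the generated divisor set: products of a starting element with a sub-multiset
theorem mem_ntfFold : ∀ (L D : List Int) (x : Int),
    x ∈ L.foldl ntfStep D ↔ ∃ d ∈ D, ∃ S, List.Sublist S L ∧ x = d * S.prod := by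
  intro L
  induction L with
  | nil =>
    intro D x
    simp only [List.foldl_nil]
    constructor
    · intro hx; exact ⟨x, hx, [], List.nil_sublist [], by simp⟩
    · rintro ⟨d, hd, S, hS, rfl⟩
      rw [List.sublist_nil.mp hS]
      simpa using hd
  | cons q L ih =>
    intro D x
    rw [List.foldl_cons, ih]
    have hmem : ∀ d : Int, d ∈ ntfStep D q ↔ d ∈ D ∨ ∃ d0 ∈ D, d = d0 * q := by
      intro d
      simp [ntfStep, PySem.Set.mem_union, PySem.Set.mem_ofList, List.mem_map, eq_comm]
    constructor
    · rintro ⟨d, hd, S, hS, rfl⟩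
      rcases (hmem d).mp hd with hd | ⟨d0, hd0, rfl⟩
      · exact ⟨d, hd, S, hS.cons q, rfl⟩
      · exact ⟨d0, hd0, q :: S, hS.cons₂ q, by rw [List.prod_cons]; ring⟩
    · rintro ⟨d, hd, S, hS, rfl⟩
      rcases List.sublist_cons_iff.mp hS with hS' | ⟨S', rfl, hS'⟩
      · exact ⟨d, (hmem d).mpr (Or.inl hd), S, hS', rfl⟩
      · exact ⟨d * q, (hmem (d * q)).mpr (Or.inr ⟨d, hd, rfl⟩), S', hS',
          by rw [List.prod_cons]; ring⟩

theorem nodup_ntfFold : ∀ (L D : List Int), D.Nodup → (L.foldl ntfStep D).Nodup := by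
  intro L
  induction L with
  | nil => intro D h; simpa using h
  | cons q L ih =>
    intro D h
    rw [List.foldl_cons]
    exact ih _ (PySem.Set.nodup_union _ _ h)

-- the two small-divisor scans produce the same list
theorem ntf_filtered_eq (n : Int) (hn : 0 ≤ n) :
    (PySem.List.sorted ((ntfOuter (n.toNat + 2) n 2 []).foldl ntfStep (PySem.Set.ofList [1]))
        (fun d => d) false).filter
      (fun d => decide (2 ≤ d ∧ d ≤ (Nat.sqrt n.toNat : Int)))
    = (PySem.List.pyRange 2 ((Nat.sqrt n.toNat : Int) + 1) 1).filter
        (fun i => decide (PySem.Int.mod n i = 0)) := by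
  set root : Int := (Nat.sqrt n.toNat : Int) with hroot
  set divs : List Int := (ntfOuter (n.toNat + 2) n 2 []).foldl ntfStep (PySem.Set.ofList [1]) with hdivs
  have hnodupL : (PySem.List.sorted divs (fun d => d) false).Nodup :=
    (PySem.List.sorted_perm divs (fun d => d) false).symm.nodup
      (nodup_ntfFold _ _ (by decide))
  have hpairL : ((PySem.List.sorted divs (fun d => d) false).filter
      (fun d => decide (2 ≤ d ∧ d ≤ root))).Pairwise (· < ·) := by
    refine List.Pairwise.filter _ ?_
    exact ((PySem.List.sorted_pairwise divs (fun d => d)).and hnodupL).imp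
      (fun h => lt_of_le_of_ne h.1 h.2)
  have hpairR : ((PySem.List.pyRange 2 (root + 1) 1).filter
      (fun i => decide (PySem.Int.mod n i = 0))).Pairwise (· < ·) :=
    List.Pairwise.filter _ (PySem.List.pairwise_lt_pyRange_one 2 (root + 1))
  rcases eq_or_lt_of_le hn with hz | hpos
  · -- n = 0 : both filtered lists are empty
    have hr0 : root = 0 := by rw [hroot, ← hz]; simp
    rw [List.filter_eq_nil_iff.mpr, List.filter_eq_nil_iff.mpr]
    · intro x hx
      rw [hr0] at hx
      rw [PySem.List.pyRange_one_eq_nil (by omega)] at hx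
      simp at hx
    · intro x _
      rw [hr0]
      simp only [decide_eq_true_eq]
      omega
  · -- n ≥ 1 : both lists are the strictly increasing list of small divisors of n
    obtain ⟨tl, houter, hprod, hprim⟩ :=
      ntfOuter_spec (n.toNat + 2) n 2 [] (le_refl 2) hpos (by omega)
        (fun q h2 hlt => absurd h2 (by omega))
    rw [List.nil_append] at houter
    have hdivmem : ∀ x : Int, 2 ≤ x → (x ∈ divs ↔ x ∣ n) := by
      intro x hx
      rw [hdivs, houter, mem_ntfFold]
      constructor
      · rintro ⟨d, hd, S, hS, rfl⟩
        have hd1 : d = 1 := by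
          have : d ∈ ([1] : List Int) := hd
          simpa using this
        rw [hd1, one_mul, ← hprod]
        exact hS.prod_dvd_prod
      · intro hdvd
        obtain ⟨S, hS, rfl⟩ := dvd_prod_primes tl hprim x (by omega) (hprod ▸ hdvd)
        exact ⟨1, by simp, S, hS, by ring⟩
    refine List.Perm.eq_of_pairwise
      (fun a b _ _ h1 h2 => absurd h2 (lt_asymm h1)) hpairL hpairR ?_
    refine (List.perm_ext_iff_of_nodup (hnodupL.filter _)
      ((PySem.List.nodup_pyRange_one 2 (root + 1)).filter _)).mpr ?_
    intro a
    rw [List.mem_filter, List.mem_filter, PySem.List.mem_sorted,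
      PySem.List.mem_pyRange_one]
    simp only [decide_eq_true_eq]
    constructor
    · rintro ⟨hmem, h2, hle⟩
      exact ⟨⟨h2, by omega⟩, (PySem.Int.mod_eq_zero_iff_dvd n a).mpr
        ((hdivmem a h2).mp hmem)⟩
    · rintro ⟨⟨h2, hlt⟩, hmod⟩
      exact ⟨(hdivmem a h2).mpr ((PySem.Int.mod_eq_zero_iff_dvd n a).mp hmod), h2, by omega⟩

-- ===== VERDICT (by name: the statement is the Claim_ definition above) =====
theorem nontrivial_factors_spec : Claim_equal_nontrivial_factors := by
  intro n _ hpre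
  unfold Spec_nontrivial_factors nontrivial_factors nontrivial_factors_alt
  simp only []
  rw [PySem.List.foldl_ite_eq_foldl_filter
      (p := fun i => PySem.Int.mod n i = 0)
      (f := fun S i => PySem.Set.add (PySem.Set.add S i) (PySem.Int.floordiv n i)),
    PySem.List.foldl_ite_eq_foldl_filter
      (p := fun d => 2 ≤ d ∧ d ≤ (Nat.sqrt n.toNat : Int))
      (f := fun S d => PySem.Set.add (PySem.Set.add S d) (PySem.Int.floordiv n d)),
    ntf_filtered_eq n hpre]
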